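-- pv_equiv track=rewrite | github.com/harshaislive/convex_agent | examples/beforest-conversational-agent/agent.py | _build_manychat_buttons
-- ===== SOURCE A (Python) =====
-- BUTTON_LIMIT = 3
--
-- def _button_caption_for_url(url: str) -> str:
--     """Build a short button caption from a Beforest URL."""
--     lower_url = url.lower()
--     if "experiences.beforest.co" in lower_url:
--         return "Explore Experiences"
--     if "/collect" in lower_url:
--         return "View Collectives"
--     if "/about" in lower_url:
--         return "About Beforest"
--     if "/contact" in lower_url or "/connect" in lower_url:
--         return "Contact Team"
--     if "beforest.co" in lower_url:
--         return "Explore Beforest"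
--     return "Open Link"
--
-- def _build_manychat_buttons(urls: list[str]) -> list[dict[str, str]]:
--     """Create a small set of URL buttons for Instagram DM replies."""
--     buttons: list[dict[str, str]] = []
--     for url in urls[:BUTTON_LIMIT]:
--         buttons.append(
--             {
--                 "type": "url",
--                 "caption": _button_caption_for_url(url),
--                 "url": url,
--             }
--         )
--     return buttons
-- ===== SOURCE B (Python) =====
-- BUTTON_LIMIT = 3
--
-- _CAPTION_RULES = [
--     ("experiences.beforest.co", "Explore Experiences"),
--     ("/collect", "View Collectives"),
--     ("/about", "About Beforest"),
--     ("/contact", "Contact Team"),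
--     ("/connect", "Contact Team"),
--     ("beforest.co", "Explore Beforest"),
-- ]
--
--
-- def _button_rule_index(low):
--     # evaluate ALL rules (no short-circuiting), then pick the highest-priority hit
--     hits = [i for i, (sub, _cap) in enumerate(_CAPTION_RULES) if sub in low]
--     return min(hits) if hits else None
--
--
-- def _build_manychat_buttons(urls):
--     def go(rest, budget):
--         if budget == 0 or not rest:
--             return []
--         head = rest[0]
--         i = _button_rule_index(head.lower())
--         cap = _CAPTION_RULES[i][1] if i is not None else "Open Link"
--         return [{"type": "url", "caption": cap, "url": head}] + go(rest[1:], budget - 1)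
--
--     return go(urls, BUTTON_LIMIT)
-- ===== Notes on version B (the rewrite author's own statement) =====
-- stated objective: alternative
-- what changed: Replaced the accumulator loop over a slice by a recursive descent with a budget counter, and the short-circuiting if-chain caption by a different selection scheme: evaluate every rule, collect the indices of all matching substrings, and index the rule table at the minimum matching index (priority = smallest index), with None/min replacing the ordered first-match scan.
import Mathlib
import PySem

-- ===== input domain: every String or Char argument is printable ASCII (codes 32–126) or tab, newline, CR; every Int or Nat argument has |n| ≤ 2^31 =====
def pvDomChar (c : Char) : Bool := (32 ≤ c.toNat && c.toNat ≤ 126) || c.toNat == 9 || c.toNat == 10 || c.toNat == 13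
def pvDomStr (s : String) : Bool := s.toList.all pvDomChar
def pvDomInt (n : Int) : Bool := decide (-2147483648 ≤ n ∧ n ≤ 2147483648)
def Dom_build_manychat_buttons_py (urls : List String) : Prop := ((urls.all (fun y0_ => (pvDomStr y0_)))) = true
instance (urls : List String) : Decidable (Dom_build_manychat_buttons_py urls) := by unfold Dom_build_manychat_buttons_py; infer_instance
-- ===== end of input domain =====

-- B (alternative, same cost): recursive descent with a budget counter instead of a loop over a slice,
-- and the caption chosen by evaluating ALL rules, taking the minimum matching rule index and indexing
-- the table there, instead of A's short-circuiting if-chain.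

-- ===== PORT A =====
def button_caption_for_url (url : String) : String :=
  let lower_url := PySem.Str.lower url
  if PySem.Str.isIn "experiences.beforest.co" lower_url then "Explore Experiences"
  else if PySem.Str.isIn "/collect" lower_url then "View Collectives"
  else if PySem.Str.isIn "/about" lower_url then "About Beforest"
  else if PySem.Str.isIn "/contact" lower_url || PySem.Str.isIn "/connect" lower_url then "Contact Team"
  else if PySem.Str.isIn "beforest.co" lower_url then "Explore Beforest"
  else "Open Link"

def build_manychat_buttons_py (urls : List String) : List (List (String × String)) :=
  (PySem.List.slice urls none (some 3)).foldl
    (fun buttons url =>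
      buttons ++ [[("type", "url"), ("caption", button_caption_for_url url), ("url", url)]])
    []

-- ===== PORT B =====
def captionRules : List (String × String) :=
  [("experiences.beforest.co", "Explore Experiences"),
   ("/collect", "View Collectives"),
   ("/about", "About Beforest"),
   ("/contact", "Contact Team"),
   ("/connect", "Contact Team"),
   ("beforest.co", "Explore Beforest")]

-- hits = indices of ALL matching rules; result = min(hits) if hits else None
def button_rule_index (low : String) : Option Int :=
  let hits : List Int :=
    (PySem.List.enumerate captionRules 0).filterMap
      (fun p => if PySem.Str.isIn p.2.1 low then some p.1 else none)
  PySem.List.min? hits (fun x => x)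

def build_buttons_go (rest : List String) (budget : Nat) : List (List (String × String)) :=
  match budget, rest with
  | 0, _ => []
  | _, [] => []
  | Nat.succ b, head :: tail =>
    let cap :=
      match button_rule_index (PySem.Str.lower head) with
      | some i => (PySem.List.pyGetD captionRules i ("", "Open Link")).2
      | none => "Open Link"
    [("type", "url"), ("caption", cap), ("url", head)] :: build_buttons_go tail b

def build_manychat_buttons_py_alt (urls : List String) : List (List (String × String)) :=
  build_buttons_go urls 3

-- ===== PRECONDITION & SPEC =====
def Spec_build_manychat_buttons_py (urls : List String) (out : List (List (String × String))) : Prop := out = build_manychat_buttons_py_alt urls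
instance (urls : List String) (out : List (List (String × String))) : Decidable (Spec_build_manychat_buttons_py urls out) := by unfold Spec_build_manychat_buttons_py; infer_instance

-- ===== CLAIM =====
def Claim_equal_build_manychat_buttons_py : Prop := ∀ (urls : List String), Dom_build_manychat_buttons_py urls → Spec_build_manychat_buttons_py urls (build_manychat_buttons_py urls)

-- ===== LEMMAS AND PROOFS =====
theorem caption_eq (url : String) :
    button_caption_for_url url =
      (match button_rule_index (PySem.Str.lower url) with
       | some i => (PySem.List.pyGetD captionRules i ("", "Open Link")).2
       | none => "Open Link") := by
  unfold button_caption_for_url button_rule_index captionRules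
  by_cases h1 : PySem.Chars.isIn ['e', 'x', 'p', 'e', 'r', 'i', 'e', 'n', 'c', 'e', 's', '.', 'b', 'e', 'f', 'o', 'r', 'e', 's', 't', '.', 'c', 'o'] (PySem.Chars.lower url.toList) <;>
  by_cases h2 : PySem.Chars.isIn ['/', 'c', 'o', 'l', 'l', 'e', 'c', 't'] (PySem.Chars.lower url.toList) <;>
  by_cases h3 : PySem.Chars.isIn ['/', 'a', 'b', 'o', 'u', 't'] (PySem.Chars.lower url.toList) <;>
  by_cases h4 : PySem.Chars.isIn ['/', 'c', 'o', 'n', 't', 'a', 'c', 't'] (PySem.Chars.lower url.toList) <;>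
  by_cases h5 : PySem.Chars.isIn ['/', 'c', 'o', 'n', 'n', 'e', 'c', 't'] (PySem.Chars.lower url.toList) <;>
  by_cases h6 : PySem.Chars.isIn ['b', 'e', 'f', 'o', 'r', 'e', 's', 't', '.', 'c', 'o'] (PySem.Chars.lower url.toList) <;>
    simp [h1, h2, h3, h4, h5, h6, PySem.List.min?, PySem.List.enumerate,
      PySem.List.pyGetD, PySem.List.pyIdx?, PySem.List.pyGet?]

theorem go_eq_map_take (rest : List String) (n : Nat) :
    build_buttons_go rest n =
      (rest.take n).map (fun url =>
        [("type", "url"), ("caption", button_caption_for_url url), ("url", url)]) := by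
  induction rest generalizing n with
  | nil => cases n <;> simp [build_buttons_go]
  | cons head tail ih =>
    cases n with
    | zero => simp [build_buttons_go]
    | succ b => simp [build_buttons_go, ih, caption_eq]

-- ===== VERDICT =====
theorem build_manychat_buttons_py_spec : Claim_equal_build_manychat_buttons_py := by
  intro urls _
  unfold Spec_build_manychat_buttons_py build_manychat_buttons_py build_manychat_buttons_py_alt
  have h3 : PySem.List.slice urls none (some 3) = urls.take 3 := by
    rw [show (3 : Int) = ((3 : Nat) : Int) from rfl, PySem.List.slice_to_natCast]
  rw [go_eq_map_take, h3, PySem.List.foldl_append_singleton_eq_map, List.map_take,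
    List.nil_append]
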